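-- pv_equiv track=rewrite | github.com/MahsaMojtabaee/FCS_HW2 | FCS_HW2.py | key_gen
-- ===== SOURCE A (Python) =====
-- def cyclic_left_shift(binary_str, shift):
--     bit_length = len(binary_str)
--     shift %= bit_length
--     shifted_str = binary_str[shift:] + binary_str[:shift]
--     return shifted_str
--
-- def key_gen(key):
--
--     sub_keys_list = []
--     key = convert_hex_to_binary(key)
--     while len(sub_keys_list) < 32:
--         subkeys = [key[i:i + 32] for i in range(0, len(key), 32)]
--         for each in subkeys:
--             sub_keys_list.append(each)
--             if len(sub_keys_list) == 32:
--                 break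
--             key = cyclic_left_shift(key, 25)
--     return sub_keys_list
--
-- def convert_hex_to_binary(hex_string):
--     integer_value = int(hex_string, 16)
--     binary_string = bin(integer_value)[2:]
--     return binary_string
-- ===== SOURCE B (Python) =====
-- def cyclic_left_shift(binary_str, shift):
--     bit_length = len(binary_str)
--     shift %= bit_length
--     shifted_str = binary_str[shift:] + binary_str[:shift]
--     return shifted_str
--
-- def convert_hex_to_binary(hex_string):
--     integer_value = int(hex_string, 16)
--     binary_string = bin(integer_value)[2:]
--     return binary_string
--
-- def key_gen(key):
--     s0 = convert_hex_to_binary(key)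
--     n = len(range(0, len(s0), 32))
--     out = []
--     for k in range(32):
--         m, j = divmod(k, n)
--         snap = cyclic_left_shift(s0, 25 * n * m)
--         out.append(snap[32 * j:32 * j + 32])
--     return out
-- ===== Notes on version B (the rewrite author's own statement) =====
-- stated objective: simpler
-- what changed: Replaces A's nested while/for with destructive key mutation and a mid-loop break by a single flat loop over range(32) that computes each subkey directly: the pass snapshot is one cyclic shift of the original bit string by 25*n*m (shifts compose additively mod the length) and the subkey is one 32-slice of it.
import Mathlib
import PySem

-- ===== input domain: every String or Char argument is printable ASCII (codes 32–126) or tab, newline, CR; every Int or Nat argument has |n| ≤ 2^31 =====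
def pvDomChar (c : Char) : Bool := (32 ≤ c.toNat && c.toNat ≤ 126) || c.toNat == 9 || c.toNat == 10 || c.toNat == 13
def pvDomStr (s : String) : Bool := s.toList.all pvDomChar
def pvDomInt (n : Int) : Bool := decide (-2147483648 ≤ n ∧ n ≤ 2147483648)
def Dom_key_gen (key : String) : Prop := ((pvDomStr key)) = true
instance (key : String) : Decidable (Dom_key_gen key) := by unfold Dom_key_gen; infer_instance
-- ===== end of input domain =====

-- B replaces A's nested while/for with destructive key mutation by a single indexed loop that
-- computes each subkey's pass snapshot directly as one cyclic shift of the original bit string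
-- (objective: simpler — one flat loop, no mutation of the key across passes).

-- ===== PORT A =====

-- helper cyclic_left_shift (shared by A and B, as in the Python module)
def pvCyclicShift (s : List Char) (shift : Int) : List Char :=
  let bitLength : Int := PySem.List.len s
  let sh := PySem.Int.mod shift bitLength
  PySem.List.slice s (some sh) none ++ PySem.List.slice s none (some sh)

-- helper convert_hex_to_binary (shared by A and B): int(hex_string, 16), bin(v)[2:]
def pvConvert (key : String) : Option (List Char) :=
  (PySem.Int.ofStrBase? key 16).map
    (fun v => PySem.List.slice (PySem.Int.toBinChars0b v) (some 2) none)

-- the comprehension [key[i:i+32] for i in range(0, len(key), 32)]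
def pvChunks (s : List Char) : List (List Char) :=
  (PySem.List.pyRange 0 (PySem.List.len s) 32).map
    (fun i => PySem.List.slice s (some i) (some (i + 32)))

-- A's inner for-loop over subkeys, with the `break` at 32 (result: list and the mutated key)
def pvInnerA : List (List Char) → List (List Char) → List Char → List (List Char) × List Char
  | [], acc, key => (acc, key)
  | c :: rest, acc, key =>
      let acc' := acc ++ [c]
      if acc'.length = 32 then (acc', key)
      else pvInnerA rest acc' (pvCyclicShift key 25)

-- A's while-loop; fuel only makes the recursion structural (32 iterations always suffice:
-- each pass appends at least one subkey, see lemmas below)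
def pvOuterA : Nat → List (List Char) → List Char → List (List Char)
  | 0, acc, _ => acc
  | fuel + 1, acc, key =>
      if acc.length < 32 then
        let r := pvInnerA (pvChunks key) acc key
        pvOuterA fuel r.1 r.2
      else acc

def key_gen (key : String) : List String :=
  match pvConvert key with
  | none => []   -- int(key, 16) raises ValueError: excluded by Pre_key_gen
  | some s0 => (pvOuterA 32 [] s0).map (fun cs => String.ofList cs)

-- ===== PORT B =====

def key_gen_alt (key : String) : List String :=
  match pvConvert key with
  | none => []   -- int(key, 16) raises ValueError: excluded by Pre_key_gen
  | some s0 =>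
      let n : Int := PySem.List.len (PySem.List.pyRange 0 (PySem.List.len s0) 32)
      (PySem.List.pyRange 0 32 1).map (fun k =>
        let m := PySem.Int.floordiv k n
        let j := PySem.Int.mod k n
        let snap := pvCyclicShift s0 (25 * n * m)
        String.ofList (PySem.List.slice snap (some (32 * j)) (some (32 * j + 32))))

-- ===== PRECONDITION & SPEC =====
-- Pre_ excludes exactly the inputs where int(key, 16) raises ValueError (A raises there).
def Pre_key_gen (key : String) : Prop := PySem.Int.ofStrBase? key 16 ≠ none
instance (key : String) : Decidable (Pre_key_gen key) := by unfold Pre_key_gen; infer_instance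
def pvWitness_key_gen : String := "1f"

def Spec_key_gen (key : String) (out : List String) : Prop := out = key_gen_alt key
instance (key : String) (out : List String) : Decidable (Spec_key_gen key out) := by unfold Spec_key_gen; infer_instance

-- ===== CLAIM (what is proved, stated in full; the proofs are below) =====
def Claim_equal_key_gen : Prop := ∀ (key : String), Dom_key_gen key → Pre_key_gen key → Spec_key_gen key (key_gen key)

-- ===== LEMMAS AND PROOFS =====

-- the common normal form of both programs: subkey k is a 32-slice of a rotation of s0
def pvSubkey (s0 : List Char) (n k : Nat) : List Char :=
  ((s0.rotate (25 * n * (k / n))).drop (32 * (k % n))).take 32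

lemma pvShift_eq_rotate (s : List Char) (t : Nat) (hs : s ≠ []) :
    pvCyclicShift s (t : Int) = s.rotate t := by
  have hL : 0 < s.length := List.length_pos_iff.mpr hs
  unfold pvCyclicShift
  simp only [PySem.List.len_eq]
  rw [PySem.Int.mod_natCast]
  rw [PySem.List.slice_from _ (by positivity), PySem.List.slice_to _ (by positivity)]
  rw [Int.toNat_natCast]
  rw [← List.rotate_mod, List.rotate_eq_drop_append_take (Nat.le_of_lt (Nat.mod_lt _ hL))]

lemma pvChunks_eq (s : List Char) (hs : s ≠ []) :
    pvChunks s = (List.range ((s.length + 31) / 32)).map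
      (fun j => (s.drop (32 * j)).take 32) := by
  have hL : 0 < s.length := List.length_pos_iff.mpr hs
  unfold pvChunks
  simp only [PySem.List.len_eq]
  rw [PySem.List.pyRange_of_pos 0 (s.length : Int) (by norm_num)]
  rw [if_pos (by exact_mod_cast hL)]
  have hn : (((s.length : Int) - 0 + 32 - 1) / 32).toNat = (s.length + 31) / 32 := by
    omega
  rw [hn, List.map_map]
  refine List.map_congr_left (fun k _ => ?_)
  have h1 : (0 : Int) + 32 * (k : Int) = ((32 * k : Nat) : Int) := by push_cast; ring
  simp only [Function.comp_apply, h1]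
  have h2 : ((32 * k : Nat) : Int) + 32 = ((32 * k : Nat) : Int) + ((32 : Nat) : Int) := by
    norm_num
  simp only [h2, PySem.List.slice_natCast_add]

lemma pvInnerA_no_break (cs : List (List Char)) :
    ∀ (acc : List (List Char)) (key : List Char), key ≠ [] →
      acc.length + cs.length < 32 →
      pvInnerA cs acc key = (acc ++ cs, key.rotate (25 * cs.length)) := by
  induction cs with
  | nil => intro acc key _ _; simp [pvInnerA]
  | cons c rest ih =>
      intro acc key hk hlt
      simp only [pvInnerA]
      rw [if_neg (by simp at hlt ⊢; omega)]
      have h25 : pvCyclicShift key 25 = key.rotate 25 := by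
        have := pvShift_eq_rotate key 25 hk
        exact_mod_cast this
      rw [h25, ih (acc ++ [c]) (key.rotate 25)
            (by simpa using hk) (by simp at hlt ⊢; omega)]
      rw [List.rotate_rotate]
      have e1 : acc ++ [c] ++ rest = acc ++ c :: rest := by simp
      have e2 : 25 + 25 * rest.length = 25 * (c :: rest).length := by
        simp [List.length_cons]; ring
      rw [e1, e2]

lemma pvInnerA_break (cs : List (List Char)) :
    ∀ (acc : List (List Char)) (key : List Char),
      acc.length < 32 → 32 ≤ acc.length + cs.length →
      (pvInnerA cs acc key).1 = acc ++ cs.take (32 - acc.length) := by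
  induction cs with
  | nil => intro acc key h1 h2; simp at h1 h2; omega
  | cons c rest ih =>
      intro acc key h1 h2
      simp only [pvInnerA]
      by_cases hb : (acc ++ [c]).length = 32
      · rw [if_pos hb]
        simp at hb ⊢
        have : 32 - acc.length = 1 := by omega
        simp [this]
      · rw [if_neg hb]
        rw [ih (acc ++ [c]) _ (by simp at hb ⊢; omega) (by simp at h2 ⊢; omega)]
        simp only [List.length_append, List.length_cons, List.length_nil]
        have : 32 - acc.length = (32 - (acc.length + 1)) + 1 := by simp at hb; omega
        rw [this, List.take_succ_cons, List.append_assoc, List.singleton_append]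

lemma pvOuterA_stop (fuel : Nat) (acc : List (List Char)) (key : List Char)
    (h : ¬ acc.length < 32) : pvOuterA fuel acc key = acc := by
  cases fuel with
  | zero => rfl
  | succ f => simp [pvOuterA, if_neg h]

lemma pvSubkey_index (s0 : List Char) (n m j : Nat) (hn : 0 < n) (hj : j < n) :
    pvSubkey s0 n (n * m + j)
      = ((s0.rotate (25 * (n * m))).drop (32 * j)).take 32 := by
  unfold pvSubkey
  have hdiv : (n * m + j) / n = m := by
    rw [Nat.mul_add_div hn, Nat.div_eq_of_lt hj, Nat.add_zero]
  have hmod : (n * m + j) % n = j := by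
    rw [Nat.mul_add_mod, Nat.mod_eq_of_lt hj]
  rw [hdiv, hmod, mul_assoc]

lemma pvOuterA_spec (s0 : List Char) (hs : s0 ≠ []) :
    ∀ (fuel m : Nat),
      (s0.length + 31) / 32 * m < 32 →
      32 - (s0.length + 31) / 32 * m ≤ fuel →
      pvOuterA fuel
          ((List.range ((s0.length + 31) / 32 * m)).map (pvSubkey s0 ((s0.length + 31) / 32)))
          (s0.rotate (25 * ((s0.length + 31) / 32 * m)))
        = (List.range 32).map (pvSubkey s0 ((s0.length + 31) / 32)) := by
  have hL : 0 < s0.length := List.length_pos_iff.mpr hs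
  set n := (s0.length + 31) / 32 with hn
  have hn1 : 0 < n := by omega
  intro fuel
  induction fuel with
  | zero => intro m h1 h2; omega
  | succ f ih =>
      intro m h1 h2
      set key := s0.rotate (25 * (n * m)) with hkey
      have hkne : key ≠ [] := by
        rw [hkey, ← List.length_pos_iff, List.length_rotate]; exact hL
      have hklen : key.length = s0.length := by rw [hkey, List.length_rotate]
      simp only [pvOuterA]
      rw [if_pos (by simp; omega)]
      have hchunks : pvChunks key = (List.range n).map
          (fun j => ((s0.rotate (25 * (n * m))).drop (32 * j)).take 32) := by
        rw [pvChunks_eq key hkne, hklen, ← hn, ← hkey]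
      have hchunks' : pvChunks key
          = (List.range n).map (fun j => pvSubkey s0 n (n * m + j)) := by
        rw [hchunks]
        exact (List.map_congr_left (fun j hj => by
          rw [pvSubkey_index s0 n m j hn1 (List.mem_range.mp hj)])).symm
      by_cases hcase : n * m + n < 32
      · -- full pass, no break
        rw [pvInnerA_no_break (pvChunks key)
              ((List.range (n * m)).map (pvSubkey s0 n)) key hkne
              (by simp [hchunks]; omega)]
        have hacc : (List.range (n * m)).map (pvSubkey s0 n) ++ pvChunks key
            = (List.range (n * (m + 1))).map (pvSubkey s0 n) := by
          rw [hchunks', Nat.mul_succ, List.range_add, List.map_append, List.map_map]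
          rfl
        have hlen : (pvChunks key).length = n := by simp [hchunks]
        have hkey' : key.rotate (25 * (pvChunks key).length)
            = s0.rotate (25 * (n * (m + 1))) := by
          rw [hlen, hkey, List.rotate_rotate]
          ring_nf
        rw [hacc, hkey']
        have hms : n * (m + 1) = n * m + n := by ring
        exact ih (m + 1) (by omega) (by omega)
      · -- final pass: break at 32
        have hfst : (pvInnerA (pvChunks key)
              ((List.range (n * m)).map (pvSubkey s0 n)) key).1
            = (List.range 32).map (pvSubkey s0 n) := by
          rw [pvInnerA_break (pvChunks key) _ key (by simp; omega)
                (by simp [hchunks]; omega)]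
          simp only [List.length_map, List.length_range]
          rw [hchunks', ← List.map_take, List.take_range]
          have hmin : min (32 - n * m) n = 32 - n * m := by omega
          rw [hmin]
          conv_rhs => rw [show (32 : Nat) = n * m + (32 - n * m) from by omega]
          rw [List.range_add, List.map_append, List.map_map]
          rfl
        rw [hfst]
        apply pvOuterA_stop
        simp
  -- (fuel induction above)

lemma pvToDigitsCore_ne_nil (b : Nat) :
    ∀ (f n : Nat) (l : List Char), l ≠ [] ∨ 0 < f → Nat.toDigitsCore b f n l ≠ [] := by
  intro f
  induction f with
  | zero => intro n l h; simp only [Nat.toDigitsCore]; tauto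
  | succ f ih =>
      intro n l _
      simp only [Nat.toDigitsCore]
      split
      · simp
      · exact ih _ _ (Or.inl (by simp))

lemma pvConvert_ne_nil (key : String) (s0 : List Char)
    (h : pvConvert key = some s0) : s0 ≠ [] := by
  unfold pvConvert at h
  obtain ⟨v, _, hv⟩ := Option.map_eq_some_iff.mp h
  subst hv
  rw [show ((2 : Int)) = ((2 : Nat) : Int) from rfl,
      PySem.List.slice_from _ (by norm_num)]
  unfold PySem.Int.toBinChars0b
  split
  · simp
  · simp only [Int.toNat_natCast, List.drop_succ_cons, List.drop]
    exact pvToDigitsCore_ne_nil 2 _ _ [] (Or.inr (by omega))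

lemma key_gen_eq_normal (key : String) (s0 : List Char)
    (h : pvConvert key = some s0) :
    key_gen key = ((List.range 32).map (pvSubkey s0 ((s0.length + 31) / 32))).map
      (fun cs => String.ofList cs) := by
  have hs : s0 ≠ [] := pvConvert_ne_nil key s0 h
  unfold key_gen
  rw [h]
  dsimp only
  have h0 := pvOuterA_spec s0 hs 32 0 (by omega) (by omega)
  simp only [Nat.mul_zero, List.range_zero, List.map_nil, List.rotate_zero] at h0
  rw [h0]

lemma key_gen_alt_eq_normal (key : String) (s0 : List Char)
    (h : pvConvert key = some s0) :
    key_gen_alt key = ((List.range 32).map (pvSubkey s0 ((s0.length + 31) / 32))).map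
      (fun cs => String.ofList cs) := by
  have hs : s0 ≠ [] := pvConvert_ne_nil key s0 h
  have hL : 0 < s0.length := List.length_pos_iff.mpr hs
  set nN := (s0.length + 31) / 32 with hnN
  have hn1 : 0 < nN := by omega
  unfold key_gen_alt
  rw [h]
  dsimp only
  have hrange : PySem.List.pyRange 0 (PySem.List.len s0) 32
      = (List.range nN).map (fun k => ((32 * k : Nat) : Int)) := by
    simp only [PySem.List.len_eq]
    rw [PySem.List.pyRange_of_pos 0 (s0.length : Int) (by norm_num)]
    rw [if_pos (by exact_mod_cast hL)]
    have : (((s0.length : Int) - 0 + 32 - 1) / 32).toNat = nN := by omega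
    rw [this]
    refine List.map_congr_left (fun k _ => ?_)
    push_cast; ring
  have hnI : PySem.List.len (PySem.List.pyRange 0 (PySem.List.len s0) 32)
      = ((nN : Nat) : Int) := by
    rw [hrange]; simp
  rw [hnI]
  rw [show PySem.List.pyRange 0 32 1
        = (List.range 32).map (fun k : Nat => (k : Int)) by
      rw [PySem.List.pyRange_one]
      norm_num
      congr 1]
  rw [List.map_map, List.map_map]
  refine List.map_congr_left (fun k _ => ?_)
  simp only [Function.comp_apply]
  rw [PySem.Int.floordiv_natCast, PySem.Int.mod_natCast]
  have hsnap : pvCyclicShift s0 (25 * ((nN : Nat) : Int) * ((k / nN : Nat) : Int))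
      = s0.rotate (25 * nN * (k / nN)) := by
    have harg : 25 * ((nN : Nat) : Int) * ((k / nN : Nat) : Int)
        = ((25 * nN * (k / nN) : Nat) : Int) := by push_cast; ring
    rw [harg]
    exact pvShift_eq_rotate s0 _ hs
  rw [hsnap]
  have hb : (32 : Int) * ((k % nN : Nat) : Int) = ((32 * (k % nN) : Nat) : Int) := by
    push_cast; ring
  have hb2 : (32 : Int) * ((k % nN : Nat) : Int) + 32
      = ((32 * (k % nN) : Nat) : Int) + ((32 : Nat) : Int) := by push_cast; ring
  rw [hb2, hb, PySem.List.slice_natCast_add]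
  rfl

-- ===== VERDICT (by name: the statement is the Claim_ definition above) =====
theorem key_gen_spec : Claim_equal_key_gen := by
  intro key _ hpre
  unfold Spec_key_gen
  have : ∃ s0, pvConvert key = some s0 := by
    unfold Pre_key_gen at hpre
    cases hv : PySem.Int.ofStrBase? key 16 with
    | none => exact absurd hv hpre
    | some v => exact ⟨_, by unfold pvConvert; rw [hv]; rfl⟩
  obtain ⟨s0, hs0⟩ := this
  rw [key_gen_eq_normal key s0 hs0, key_gen_alt_eq_normal key s0 hs0]
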